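-- pv_equiv track=rewrite | github.com/NathanLaCrosse/WorldGen | TileCollection.py | build_tile_lookup
-- ===== SOURCE A (Python) =====
-- def hash_tile(tile,numColors):
--     flat = [pixel for row in tile for pixel in row]
--     hash = 0
--     for i in range(len(flat)):
--         hash += flat[i] * (numColors ** i)
--     return hash
--
-- def build_tile_lookup(tiles, weights, numColors):
--     tile_set  = {}
--
--     for i in range(len(tiles)):
--         h = hash_tile(tiles[i],numColors)
--         tile_set [h] = weights[i]
--
--     hash_to_num = {}
--     num_to_hash = {}
--
--     for i, h in enumerate(tile_set.keys()):
--         hash_to_num[h] = i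
--         num_to_hash[i] = h
--
--     return hash_to_num, num_to_hash, tile_set
-- ===== SOURCE B (Python) =====
-- def hash_tile(tile, numColors):
--     # right-to-left Horner evaluation: no power bookkeeping at all
--     h = 0
--     for row in reversed(tile):
--         for pixel in reversed(row):
--             h = h * numColors + pixel
--     return h
--
-- def build_tile_lookup(tiles, weights, numColors):
--     # single pass: indices are assigned the first time a hash appears,
--     # which is exactly the key order of the incrementally built tile_set
--     tile_set = {}
--     hash_to_num = {}
--     num_to_hash = {}
--     for t, w in zip(tiles, weights):
--         h = hash_tile(t, numColors)
--         if h not in hash_to_num: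
--             idx = len(hash_to_num)
--             hash_to_num[h] = idx
--             num_to_hash[idx] = h
--         tile_set[h] = w
--     return hash_to_num, num_to_hash, tile_set
-- ===== Notes on version B (the rewrite author's own statement) =====
-- stated objective: faster
-- what changed: B hashes each tile by right-to-left Horner evaluation (no powers computed) and builds all three dicts in ONE pass, assigning an index the first time a hash is seen, instead of A's hash pass followed by a second enumerate pass over the keys.
import Mathlib
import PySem

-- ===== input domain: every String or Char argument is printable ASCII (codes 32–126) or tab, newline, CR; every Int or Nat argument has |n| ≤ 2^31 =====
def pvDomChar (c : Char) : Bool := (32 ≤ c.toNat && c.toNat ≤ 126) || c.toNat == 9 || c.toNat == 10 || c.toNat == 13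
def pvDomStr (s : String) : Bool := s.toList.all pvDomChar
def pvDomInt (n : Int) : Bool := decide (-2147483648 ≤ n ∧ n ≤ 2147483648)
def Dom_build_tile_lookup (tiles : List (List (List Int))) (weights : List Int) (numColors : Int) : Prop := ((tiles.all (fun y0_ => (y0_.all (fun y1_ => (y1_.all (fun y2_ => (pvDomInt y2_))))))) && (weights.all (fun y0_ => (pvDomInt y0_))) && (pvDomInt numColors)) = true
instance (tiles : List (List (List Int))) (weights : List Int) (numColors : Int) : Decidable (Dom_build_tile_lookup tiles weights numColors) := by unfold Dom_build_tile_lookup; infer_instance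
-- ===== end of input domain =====

-- B hashes tiles by right-to-left Horner evaluation (no powers) and builds all three dicts
-- in a single pass (index assigned at first sight of a hash) instead of A's two staged passes.

-- ===== PORT A =====
-- hash = 0; for i in range(len(flat)): hash += flat[i] * numColors**i
def hash_tile (tile : List (List Int)) (numColors : Int) : Int :=
  let flat := tile.flatten
  (List.range flat.length).foldl (fun h i => h + flat.getD i 0 * numColors ^ i) 0

def build_tile_lookup (tiles : List (List (List Int))) (weights : List Int) (numColors : Int) : (List (Int × Int)) × (List (Int × Int)) × (List (Int × Int)) :=
  -- for i in range(len(tiles)): tile_set[hash_tile(tiles[i], numColors)] = weights[i]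
  let tile_set : PySem.Dict Int Int :=
    (List.range tiles.length).foldl
      (fun d i => d.insert (hash_tile (tiles.getD i []) numColors) (weights.getD i 0)) PySem.Dict.empty
  -- for i, h in enumerate(tile_set.keys()): hash_to_num[h] = i; num_to_hash[i] = h
  let p : PySem.Dict Int Int × PySem.Dict Int Int :=
    (PySem.List.enumerate tile_set.keys 0).foldl
      (fun p ih => (p.1.insert ih.2 ih.1, p.2.insert ih.1 ih.2))
      (PySem.Dict.empty, PySem.Dict.empty)
  (p.1.items, p.2.items, tile_set.items)

-- ===== PORT B =====
-- h = 0; for row in reversed(tile): for pixel in reversed(row): h = h * numColors + pixel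
def hash_tile_alt (tile : List (List Int)) (numColors : Int) : Int :=
  tile.reverse.foldl (fun h row => row.reverse.foldl (fun h pixel => h * numColors + pixel) h) 0

def build_tile_lookup_alt (tiles : List (List (List Int))) (weights : List Int) (numColors : Int) : (List (Int × Int)) × (List (Int × Int)) × (List (Int × Int)) :=
  -- single pass over zip(tiles, weights); index assigned when a hash is first seen
  let st :=
    (tiles.zip weights).foldl
      (fun (s : PySem.Dict Int Int × PySem.Dict Int Int × PySem.Dict Int Int) tw =>
        let h := hash_tile_alt tw.1 numColors
        if s.1.contains h then
          (s.1, s.2.1, s.2.2.insert h tw.2)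
        else
          (s.1.insert h (s.1.size : Int), s.2.1.insert (s.1.size : Int) h, s.2.2.insert h tw.2))
      (PySem.Dict.empty, PySem.Dict.empty, PySem.Dict.empty)
  (st.1.items, st.2.1.items, st.2.2.items)

-- ===== PRECONDITION & SPEC =====
-- A raises IndexError on weights[i] exactly when len(weights) < len(tiles); those inputs are excluded.
def Pre_build_tile_lookup (tiles : List (List (List Int))) (weights : List Int) (numColors : Int) : Prop :=
  tiles.length ≤ weights.length
instance (tiles : List (List (List Int))) (weights : List Int) (numColors : Int) : Decidable (Pre_build_tile_lookup tiles weights numColors) := by unfold Pre_build_tile_lookup; infer_instance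

def pvWitness_build_tile_lookup : List (List (List Int)) × List Int × Int := ([[[1, 0], [2]]], [3], 4)

def Spec_build_tile_lookup (tiles : List (List (List Int))) (weights : List Int) (numColors : Int) (out : (List (Int × Int)) × (List (Int × Int)) × (List (Int × Int))) : Prop := out = build_tile_lookup_alt tiles weights numColors
instance (tiles : List (List (List Int))) (weights : List Int) (numColors : Int) (out : (List (Int × Int)) × (List (Int × Int)) × (List (Int × Int))) : Decidable (Spec_build_tile_lookup tiles weights numColors out) := by unfold Spec_build_tile_lookup; infer_instance

-- ===== CLAIM =====
def Claim_equal_build_tile_lookup : Prop := ∀ (tiles : List (List (List Int))) (weights : List Int) (numColors : Int), Dom_build_tile_lookup tiles weights numColors → Pre_build_tile_lookup tiles weights numColors → Spec_build_tile_lookup tiles weights numColors (build_tile_lookup tiles weights numColors)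


-- ===== LEMMAS AND PROOFS =====

-- Horner recurrence as a reference spec
def hornerSum : List Int → Int → Int
  | [], _ => 0
  | x :: xs, c => x + c * hornerSum xs c

theorem horner_foldl_rev (l : List Int) (c : Int) : ∀ h : Int,
    l.reverse.foldl (fun h pixel => h * c + pixel) h = h * c ^ l.length + hornerSum l c := by
  induction l with
  | nil => intro h; simp [hornerSum]
  | cons x xs ih =>
    intro h
    simp only [List.reverse_cons, List.foldl_append, List.foldl_cons, List.foldl_nil, hornerSum,
      List.length_cons, ih]
    ring

theorem foldl_add_gen (m : List Nat) (g : Nat → Int) : ∀ b : Int,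
    m.foldl (fun h i => h + g i) b = b + (m.map g).sum := by
  induction m with
  | nil => intro b; simp
  | cons y ys ih => intro b; simp only [List.foldl_cons, List.map_cons, List.sum_cons, ih]; ring

theorem sum_horner (l : List Int) (c : Int) :
    ((List.range l.length).map (fun i => l.getD i 0 * c ^ i)).sum = hornerSum l c := by
  induction l with
  | nil => simp [show hornerSum [] c = 0 from rfl]
  | cons x xs ih =>
    rw [show hornerSum (x :: xs) c = x + c * hornerSum xs c from rfl, ← ih]
    simp only [List.length_cons, List.range_succ_eq_map, List.map_cons, List.map_map, List.sum_cons]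
    simp only [Function.comp_def, List.getD_cons_zero, List.getD_cons_succ, pow_zero, mul_one, pow_succ]
    have key : ∀ i : Nat, xs.getD i 0 * (c ^ i * c) = c * (xs.getD i 0 * c ^ i) := by
      intro i; ring
    simp only [key]
    rw [List.sum_map_mul_left]

theorem hash_fold_eq (tile : List (List Int)) (c : Int) : hash_tile_alt tile c = hash_tile tile c := by
  unfold hash_tile_alt hash_tile
  have lhs : tile.reverse.foldl (fun h row => row.reverse.foldl (fun h pixel => h * c + pixel) h) 0
      = tile.flatten.reverse.foldl (fun h pixel => h * c + pixel) (0 : Int) := by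
    rw [List.reverse_flatten, List.foldl_flatten, ← List.map_reverse, List.foldl_map]
  rw [lhs, horner_foldl_rev, foldl_add_gen, sum_horner]
  ring

theorem zip_eq_map_range (tiles : List (List (List Int))) (weights : List Int)
    (h : tiles.length ≤ weights.length) :
    tiles.zip weights = (List.range tiles.length).map (fun i => (tiles.getD i [], weights.getD i 0)) := by
  apply List.ext_getElem
  · simp [List.length_zip]; omega
  · intro i h1 h2
    have hi : i < tiles.length := by
      simp only [List.length_zip] at h1; omega
    have hw : i < weights.length := lt_of_lt_of_le hi h
    simp [List.getElem_zip, List.getElem?_eq_getElem hi, List.getElem?_eq_getElem hw]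

-- the two dicts A's second loop builds from a key list
def hDict (ks : List Int) : PySem.Dict Int Int :=
  (PySem.List.enumerate ks 0).foldl (fun d ih => d.insert ih.2 ih.1) PySem.Dict.empty
def nDict (ks : List Int) : PySem.Dict Int Int :=
  (PySem.List.enumerate ks 0).foldl (fun d ih => d.insert ih.1 ih.2) PySem.Dict.empty

theorem keys_hDict (ks : List Int) (h : ks.Nodup) : (hDict ks).keys = ks := by
  unfold hDict
  rw [PySem.Dict.keys_foldl_insert_key (key := fun ih : Int × Int => ih.2)
      (f := fun (d : PySem.Dict Int Int) (ih : Int × Int) => ih.1)]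
  simp only [PySem.Dict.keys_empty, PySem.List.map_snd_enumerate, PySem.Set.update_nil_left]
  exact PySem.Set.ofList_eq_self_of_nodup ks h

theorem hDict_append (ks : List Int) (x : Int) :
    hDict (ks ++ [x]) = (hDict ks).insert x (ks.length : Int) := by
  unfold hDict
  rw [PySem.List.enumerate_append, List.foldl_append]
  simp

theorem nDict_append (ks : List Int) (x : Int) :
    nDict (ks ++ [x]) = (nDict ks).insert (ks.length : Int) x := by
  unfold nDict
  rw [PySem.List.enumerate_append, List.foldl_append]
  simp

theorem size_hDict (ks : List Int) (h : ks.Nodup) : (hDict ks).size = ks.length := by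
  have : (hDict ks).keys.length = ks.length := by rw [keys_hDict ks h]
  simpa [PySem.Dict.keys, PySem.Dict.size] using this

-- the single-pass loop invariant
theorem loop_inv (c : Int) (L : List ((List (List Int)) × Int)) :
    ∀ (d : PySem.Dict Int Int), d.keys.Nodup →
    L.foldl
      (fun (s : PySem.Dict Int Int × PySem.Dict Int Int × PySem.Dict Int Int) tw =>
        let h := hash_tile_alt tw.1 c
        if s.1.contains h then
          (s.1, s.2.1, s.2.2.insert h tw.2)
        else
          (s.1.insert h (s.1.size : Int), s.2.1.insert (s.1.size : Int) h, s.2.2.insert h tw.2))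
      (hDict d.keys, nDict d.keys, d)
    = (hDict (L.foldl (fun d p => d.insert (hash_tile_alt p.1 c) p.2) d).keys,
       nDict (L.foldl (fun d p => d.insert (hash_tile_alt p.1 c) p.2) d).keys,
       L.foldl (fun d p => d.insert (hash_tile_alt p.1 c) p.2) d) := by
  induction L with
  | nil => intro d hnd; rfl
  | cons tw rest ih =>
    intro d hnd
    have hnd' : (d.insert (hash_tile_alt tw.1 c) tw.2).keys.Nodup :=
      PySem.Dict.nodup_keys_insert _ _ _ hnd
    have hkeys := keys_hDict d.keys hnd
    simp only [List.foldl_cons]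
    by_cases hm : hash_tile_alt tw.1 c ∈ d.keys
    · have hc : (hDict d.keys).contains (hash_tile_alt tw.1 c) = true := by
        rw [PySem.Dict.contains_iff_mem_keys, hkeys]; exact hm
      have hcd : d.contains (hash_tile_alt tw.1 c) = true := by
        rw [PySem.Dict.contains_iff_mem_keys]; exact hm
      have hk2 : (d.insert (hash_tile_alt tw.1 c) tw.2).keys = d.keys :=
        PySem.Dict.keys_insert_of_contains d tw.2 hcd
      simp only [hc, if_true]
      have := ih (d.insert (hash_tile_alt tw.1 c) tw.2) hnd'
      rw [hk2] at this
      exact this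
    · have hc : (hDict d.keys).contains (hash_tile_alt tw.1 c) = false := by
        rw [Bool.eq_false_iff, Ne, PySem.Dict.contains_iff_mem_keys, hkeys]; exact hm
      have hcd : d.contains (hash_tile_alt tw.1 c) = false := by
        rw [Bool.eq_false_iff, Ne, PySem.Dict.contains_iff_mem_keys]; exact hm
      have hk2 : (d.insert (hash_tile_alt tw.1 c) tw.2).keys = d.keys ++ [hash_tile_alt tw.1 c] :=
        PySem.Dict.keys_insert_of_not_contains d tw.2 hcd
      have hsz : (hDict d.keys).size = d.keys.length := size_hDict d.keys hnd
      simp only [hc, if_false, Bool.false_eq_true]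
      have := ih (d.insert (hash_tile_alt tw.1 c) tw.2) hnd'
      rw [hk2, hDict_append, nDict_append] at this
      rw [hsz]
      exact this

theorem pair_fold (l : List (Int × Int)) : ∀ (a b : PySem.Dict Int Int),
    l.foldl (fun p ih => (p.1.insert ih.2 ih.1, p.2.insert ih.1 ih.2)) (a, b)
      = (l.foldl (fun d ih => d.insert ih.2 ih.1) a, l.foldl (fun d ih => d.insert ih.1 ih.2) b) := by
  induction l with
  | nil => intro a b; simp
  | cons x xs ih => intro a b; simp only [List.foldl_cons]; exact ih _ _

-- ===== VERDICT =====
theorem build_tile_lookup_spec : Claim_equal_build_tile_lookup := by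
  intro tiles weights numColors _ hpre
  unfold Spec_build_tile_lookup build_tile_lookup build_tile_lookup_alt
  have hts : (tiles.zip weights).foldl
      (fun (d : PySem.Dict Int Int) tw => d.insert (hash_tile_alt tw.1 numColors) tw.2) PySem.Dict.empty
      = (List.range tiles.length).foldl
      (fun d i => d.insert (hash_tile (tiles.getD i []) numColors) (weights.getD i 0)) PySem.Dict.empty := by
    rw [zip_eq_map_range tiles weights hpre, List.foldl_map]
    simp only [hash_fold_eq]
  have hinv := loop_inv numColors (tiles.zip weights) PySem.Dict.empty (by simp)
  simp only [PySem.Dict.keys_empty] at hinv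
  have h0 : hDict ([] : List Int) = PySem.Dict.empty := rfl
  have n0 : nDict ([] : List Int) = PySem.Dict.empty := rfl
  rw [h0, n0] at hinv
  simp only [hinv, hts, pair_fold]
  rfl
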